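-- pv_equiv track=rewrite | github.com/mauryakshitij/BTP | partition_metis_aig.py | get_connected_components
-- ===== SOURCE A (Python) =====
-- from collections import defaultdict
--
-- def get_connected_components(graph1, graph2,inputs,outputs):
--     # Combine the two directional graphs into an undirected graph
--     combined_graph = defaultdict(set)
--
--     # Add edges from graph1
--     for node, children in graph1.items():
--         for child in children:
--             combined_graph[node].add(child)
--             combined_graph[child].add(node)
--
--     # Add edges from graph2
--     for node, children in graph2.items():
--         for child in children:
--             combined_graph[node].add(child)
--             combined_graph[child].add(node)
--
--     # To store the connected components
--     visited = set()
--     connected_components = []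
--
--     def dfs(node, component):
--
--         if node in inputs:
--             component.add(node)
--             return
--
--         stack = [node]
--         visited.add(node)
--
--         while stack:
--             current = stack.pop()
--             component.add(current)
--
--             # Traverse neighbors but skip connections through special nodes
--             for neighbor in combined_graph[current]:
--                 if neighbor not in visited:
--                     # Add special nodes to the component but do not traverse through them
--                     if neighbor in inputs:
--                         component.add(neighbor)
--                         continue
--                     visited.add(neighbor)
--                     stack.append(neighbor)
--
--     # Find all connected components
--     for node in outputs:
--         if node not in visited:
--             component = set()
--             dfs(node, component)
--             connected_components.append(component)
--
--     return connected_components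
-- ===== SOURCE B (Python) =====
-- def get_connected_components(graph1, graph2, inputs, outputs):
--     # Build the combined undirected adjacency once, via a shared link helper.
--     adj = {}
--
--     def link(a, b):
--         adj.setdefault(a, set()).add(b)
--         adj.setdefault(b, set()).add(a)
--
--     for g in (graph1, graph2):
--         for node, children in g.items():
--             for child in children:
--                 link(node, child)
--
--     inputset = set(inputs)
--     n = len(adj)
--
--     seen = set()
--     result = []
--     for o in outputs:
--         if o in inputset:
--             # an output that is an input node is its own singleton component
--             result.append({o})
--             continue
--         if o in seen:
--             continue
--         # fixed-point saturation: repeatedly add all neighbors of the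
--         # non-input members until the set stops growing (at most n rounds)
--         comp = {o}
--         for _ in range(n):
--             new = set(comp)
--             for x in comp:
--                 if x not in inputset:
--                     new |= adj.get(x, set())
--             if new == comp:
--                 break
--             comp = new
--         seen |= comp - inputset
--         result.append(comp)
--     return result
-- ===== Notes on version B (the rewrite author's own statement) =====
-- stated objective: alternative
-- what changed: Replaces A's per-output stack-based DFS (with a shared visited set threaded through the traversal) by a per-output fixed-point saturation: repeatedly union the neighbor sets of all non-input members of the component until it stops growing, then mark its non-input part as seen.
import Mathlib
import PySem

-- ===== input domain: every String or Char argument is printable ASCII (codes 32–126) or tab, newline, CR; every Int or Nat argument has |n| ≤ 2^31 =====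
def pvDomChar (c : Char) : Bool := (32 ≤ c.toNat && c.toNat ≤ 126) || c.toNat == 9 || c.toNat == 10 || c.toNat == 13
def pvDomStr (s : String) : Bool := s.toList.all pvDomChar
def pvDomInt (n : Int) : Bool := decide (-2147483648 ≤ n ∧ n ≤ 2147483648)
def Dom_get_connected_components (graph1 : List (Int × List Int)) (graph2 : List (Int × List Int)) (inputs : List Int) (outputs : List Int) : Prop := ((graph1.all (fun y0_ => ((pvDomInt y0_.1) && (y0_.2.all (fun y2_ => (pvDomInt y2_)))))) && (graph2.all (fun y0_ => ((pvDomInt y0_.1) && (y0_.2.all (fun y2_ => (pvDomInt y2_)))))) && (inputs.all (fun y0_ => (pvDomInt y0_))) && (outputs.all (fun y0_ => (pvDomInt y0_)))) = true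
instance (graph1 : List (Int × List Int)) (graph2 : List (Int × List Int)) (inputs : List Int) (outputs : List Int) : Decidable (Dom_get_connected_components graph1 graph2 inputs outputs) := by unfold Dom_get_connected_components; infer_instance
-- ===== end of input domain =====

-- B replaces A's per-output stack DFS by a per-output fixed-point saturation over the
-- combined adjacency (repeatedly union the neighbor sets of the non-input members until
-- the component stops growing); objective: alternative (not faster).
-- Python returns a list of SETS; set iteration order is not modelled (PYSEM.md), so both
-- ports emit each component set in sorted order — exact as a set value.

-- ===== PORT A =====
-- helper: the two add-edge statements of A's build loops (combined_graph[node].add(child); combined_graph[child].add(node))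
def pvA_addEdges (g : PySem.Dict Int (PySem.Set Int)) (graph : List (Int × List Int)) : PySem.Dict Int (PySem.Set Int) :=
  graph.foldl
    (fun g p =>
      p.2.foldl
        (fun g child =>
          let g' := g.insert p.1 (PySem.Set.add (g.getD p.1 PySem.Set.empty) child)
          g'.insert child (PySem.Set.add (g'.getD child PySem.Set.empty) p.1))
        g)
    g

-- helper: the body of A's `for neighbor in combined_graph[current]` loop; the state is (stack, visited, component)
def pvA_visit (_cg : PySem.Dict Int (PySem.Set Int)) (inputs : List Int)
    (st : List Int × PySem.Set Int × PySem.Set Int) (neighbor : Int) :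
    List Int × PySem.Set Int × PySem.Set Int :=
  if PySem.Set.contains st.2.1 neighbor then st
  else if neighbor ∈ inputs then (st.1, st.2.1, PySem.Set.add st.2.2 neighbor)
  else (neighbor :: st.1, PySem.Set.add st.2.1 neighbor, st.2.2)

-- A's `while stack:` loop; the stack keeps its top at the head (Python pops/appends at
-- the list's end; the order is its mirror image).  The fuel only makes the recursion
-- structural; `cg.size + 1` is proved sufficient below (pvA_loop lemmas).
def pvA_dfsLoop (cg : PySem.Dict Int (PySem.Set Int)) (inputs : List Int) :
    Nat → List Int → PySem.Set Int → PySem.Set Int → PySem.Set Int × PySem.Set Int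
  | 0, _, visited, component => (visited, component)
  | _ + 1, [], visited, component => (visited, component)
  | fuel + 1, current :: stack, visited, component =>
    let component := PySem.Set.add component current
    let st := (cg.getD current PySem.Set.empty).foldl (pvA_visit cg inputs) (stack, visited, component)
    pvA_dfsLoop cg inputs fuel st.1 st.2.1 st.2.2

-- A's dfs(node, component); returns the final (visited, component)
def pvA_dfs (cg : PySem.Dict Int (PySem.Set Int)) (inputs : List Int) (node : Int)
    (visited component : PySem.Set Int) : PySem.Set Int × PySem.Set Int :=
  if node ∈ inputs then (visited, PySem.Set.add component node)
  else pvA_dfsLoop cg inputs (cg.size + 1) [node] (PySem.Set.add visited node) component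

-- the body of A's `for node in outputs:` loop; the state is (visited, connected_components)
def pvA_round (cg : PySem.Dict Int (PySem.Set Int)) (inputs : List Int)
    (st : PySem.Set Int × List (List Int)) (node : Int) : PySem.Set Int × List (List Int) :=
  if PySem.Set.contains st.1 node then st
  else
    let r := pvA_dfs cg inputs node st.1 PySem.Set.empty
    (r.1, st.2 ++ [PySem.List.sorted r.2 (fun x => x)])

def get_connected_components (graph1 : List (Int × List Int)) (graph2 : List (Int × List Int)) (inputs : List Int) (outputs : List Int) : List (List Int) :=
  let cg := pvA_addEdges (pvA_addEdges PySem.Dict.empty graph1) graph2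
  (outputs.foldl (pvA_round cg inputs) (PySem.Set.empty, [])).2

-- ===== PORT B =====
-- helper: B's link(a, b) (adj.setdefault(a,set()).add(b); adj.setdefault(b,set()).add(a))
def pvB_link (adj : PySem.Dict Int (PySem.Set Int)) (a b : Int) : PySem.Dict Int (PySem.Set Int) :=
  let adj' := adj.insert a (PySem.Set.add (adj.getD a PySem.Set.empty) b)
  adj'.insert b (PySem.Set.add (adj'.getD b PySem.Set.empty) a)

-- B's `for g in (graph1, graph2): ...` build loop
def pvB_build (graphs : List (List (Int × List Int))) : PySem.Dict Int (PySem.Set Int) :=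
  graphs.foldl
    (fun adj g => g.foldl (fun adj p => p.2.foldl (fun adj c => pvB_link adj p.1 c) adj) adj)
    PySem.Dict.empty

-- one saturation round: new = set(comp); for x in comp: if x not in inputset: new |= adj.get(x, set())
def pvB_grow (adj : PySem.Dict Int (PySem.Set Int)) (inputset : PySem.Set Int)
    (comp : PySem.Set Int) : PySem.Set Int :=
  comp.foldl
    (fun new x => if PySem.Set.contains inputset x then new else PySem.Set.union new (adj.getD x PySem.Set.empty))
    comp

-- B's `for _ in range(n): ... if new == comp: break` saturation loop
def pvB_saturate (adj : PySem.Dict Int (PySem.Set Int)) (inputset : PySem.Set Int) :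
    Nat → PySem.Set Int → PySem.Set Int
  | 0, comp => comp
  | n + 1, comp =>
    let new := pvB_grow adj inputset comp
    if PySem.Set.equal new comp then comp else pvB_saturate adj inputset n new

-- the body of B's `for o in outputs:` loop; the state is (seen, result)
def pvB_round (adj : PySem.Dict Int (PySem.Set Int)) (inputset : PySem.Set Int) (n : Nat)
    (st : PySem.Set Int × List (List Int)) (o : Int) : PySem.Set Int × List (List Int) :=
  if PySem.Set.contains inputset o then
    (st.1, st.2 ++ [PySem.List.sorted (PySem.Set.add PySem.Set.empty o) (fun x => x)])
  else if PySem.Set.contains st.1 o then st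
  else
    let comp := pvB_saturate adj inputset n (PySem.Set.add PySem.Set.empty o)
    (PySem.Set.update st.1 (PySem.Set.diff comp inputset), st.2 ++ [PySem.List.sorted comp (fun x => x)])

def get_connected_components_alt (graph1 : List (Int × List Int)) (graph2 : List (Int × List Int)) (inputs : List Int) (outputs : List Int) : List (List Int) :=
  let adj := pvB_build [graph1, graph2]
  let inputset := PySem.Set.ofList inputs
  let n := adj.size
  (outputs.foldl (pvB_round adj inputset n) (PySem.Set.empty, [])).2

-- ===== PRECONDITION & SPEC =====
def Spec_get_connected_components (graph1 : List (Int × List Int)) (graph2 : List (Int × List Int)) (inputs : List Int) (outputs : List Int) (out : List (List Int)) : Prop := out = get_connected_components_alt graph1 graph2 inputs outputs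
instance (graph1 : List (Int × List Int)) (graph2 : List (Int × List Int)) (inputs : List Int) (outputs : List Int) (out : List (List Int)) : Decidable (Spec_get_connected_components graph1 graph2 inputs outputs out) := by unfold Spec_get_connected_components; infer_instance

-- ===== CLAIM (what is proved, stated in full; the proofs are below) =====
def Claim_equal_get_connected_components : Prop := ∀ (graph1 : List (Int × List Int)) (graph2 : List (Int × List Int)) (inputs : List Int) (outputs : List Int), Dom_get_connected_components graph1 graph2 inputs outputs → Spec_get_connected_components graph1 graph2 inputs outputs (get_connected_components graph1 graph2 inputs outputs)

-- ===== LEMMAS AND PROOFS =====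

-- neighbours, the traversal relation (edges between non-input nodes) and its closure
def pvN (cg : PySem.Dict Int (PySem.Set Int)) (x : Int) : List Int := cg.getD x PySem.Set.empty
def pvR (cg : PySem.Dict Int (PySem.Set Int)) (inputs : List Int) (x y : Int) : Prop :=
  x ∉ inputs ∧ y ∉ inputs ∧ y ∈ pvN cg x
def pvCl (cg : PySem.Dict Int (PySem.Set Int)) (inputs : List Int) : Int → Int → Prop :=
  Relation.ReflTransGen (pvR cg inputs)
-- the component of a non-input output o: its closure class plus adjacent input nodes
def pvComp (cg : PySem.Dict Int (PySem.Set Int)) (inputs : List Int) (o x : Int) : Prop :=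
  pvCl cg inputs o x ∨ (x ∈ inputs ∧ ∃ z, pvCl cg inputs o z ∧ x ∈ pvN cg z)

-- well-formedness of the built adjacency: symmetric, values are keys, keys nodup
def pvGood (cg : PySem.Dict Int (PySem.Set Int)) : Prop :=
  (∀ a b, b ∈ pvN cg a → a ∈ pvN cg b) ∧ (∀ a b, b ∈ pvN cg a → b ∈ cg.keys) ∧ cg.keys.Nodup

-- number of not-yet-visited keys (the A-loop's termination measure)
def pvUnv (cg : PySem.Dict Int (PySem.Set Int)) (visited : PySem.Set Int) : Nat :=
  (cg.keys.filter (fun k => !(PySem.Set.contains visited k))).length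

-- the A-loop invariant
structure pvInv (cg : PySem.Dict Int (PySem.Set Int)) (inputs : List Int) (o : Int)
    (V0 : PySem.Set Int) (stack : List Int) (visited comp : PySem.Set Int) : Prop where
  stack_ok : ∀ x ∈ stack, x ∈ visited ∧ pvCl cg inputs o x ∧ x ∉ inputs
  vis_sound : ∀ x ∈ visited, x ∈ V0 ∨ (pvCl cg inputs o x ∧ x ∉ inputs)
  vis_mono : ∀ x ∈ V0, x ∈ visited
  o_vis : o ∈ visited
  expanded : ∀ x ∈ visited, x ∉ V0 → x ∈ stack ∨ ∀ y ∈ pvN cg x, y ∉ inputs → y ∈ visited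
  comp_sound : ∀ c ∈ comp, pvComp cg inputs o c
  popped_comp : ∀ x ∈ visited, x ∉ V0 → x ∉ stack → x ∈ comp
  popped_inp : ∀ x ∈ visited, x ∉ V0 → x ∉ stack → ∀ y ∈ pvN cg x, y ∈ inputs → y ∈ comp
  vis_nodup : visited.Nodup
  comp_nodup : comp.Nodup

theorem pvCl_noninp (cg : PySem.Dict Int (PySem.Set Int)) (inputs : List Int) {o x : Int}
    (ho : o ∉ inputs) (h : pvCl cg inputs o x) : x ∉ inputs := by
  induction h with
  | refl => exact ho
  | tail _ h2 _ => exact h2.2.1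

-- a closure class is contained in any R-closed set containing its root
theorem pvCl_subset_closed (cg : PySem.Dict Int (PySem.Set Int)) (inputs : List Int)
    {o x : Int} (S : List Int) (hS : ∀ a ∈ S, ∀ b, pvR cg inputs a b → b ∈ S)
    (ho : o ∈ S) (h : pvCl cg inputs o x) : x ∈ S := by
  induction h with
  | refl => exact ho
  | tail h1 h2 ih => exact hS _ ih _ h2

theorem pvR_symm (cg : PySem.Dict Int (PySem.Set Int)) (inputs : List Int)
    (hsym : ∀ a b, b ∈ pvN cg a → a ∈ pvN cg b) : Symmetric (pvR cg inputs) := by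
  intro a b ⟨h1, h2, h3⟩; exact ⟨h2, h1, hsym _ _ h3⟩

-- sorted emission: two nodup lists with the same members sort identically
theorem pv_sorted_eq (xs ys : List Int) (hx : xs.Nodup) (hy : ys.Nodup)
    (hm : ∀ a, a ∈ xs ↔ a ∈ ys) :
    PySem.List.sorted xs (fun x => x) = PySem.List.sorted ys (fun x => x) := by
  have hperm : xs.Perm ys := (List.perm_ext_iff_of_nodup hx hy).2 hm
  have hz1 : (PySem.List.sorted xs (fun x => x)).Perm xs := PySem.List.sorted_perm xs _ false
  have hznd : (PySem.List.sorted xs (fun x => x)).Nodup := hz1.nodup_iff.2 hx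
  have hle : (PySem.List.sorted xs (fun x => x)).Pairwise (fun a b : Int => a ≤ b) :=
    PySem.List.sorted_pairwise xs (fun x => x)
  have hlt : (PySem.List.sorted xs (fun x => x)).Pairwise (fun a b : Int => a < b) :=
    (hle.and hznd).imp (fun h => lt_of_le_of_ne h.1 h.2)
  rw [PySem.List.sorted_eq_of_perm_of_pairwise_lt xs _ _ hz1 hlt,
    PySem.List.sorted_eq_of_perm_of_pairwise_lt ys _ _ (hz1.trans hperm) hlt]

-- graph building produces a well-formed adjacency
theorem pvGood_empty : pvGood PySem.Dict.empty := by
  refine ⟨?_, ?_, ?_⟩ <;>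
    simp [pvN, PySem.Dict.getD, PySem.Dict.get?, PySem.Dict.keys, PySem.Dict.empty]
theorem pvN_link (g : PySem.Dict Int (PySem.Set Int)) (a b x y : Int) :
    y ∈ pvN (pvB_link g a b) x ↔ y ∈ pvN g x ∨ (x = a ∧ y = b) ∨ (x = b ∧ y = a) := by
  simp only [pvB_link, pvN, PySem.Dict.getD_insert, PySem.Set.mem_add]
  split_ifs <;> simp_all

theorem pv_keys_link (g : PySem.Dict Int (PySem.Set Int)) (a b x : Int) :
    x ∈ (pvB_link g a b).keys ↔ x = a ∨ x = b ∨ x ∈ g.keys := by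
  simp only [pvB_link, PySem.Dict.mem_keys_insert]
  tauto

theorem pvGood_link (g : PySem.Dict Int (PySem.Set Int)) (a b : Int) (h : pvGood g) :
    pvGood (pvB_link g a b) := by
  obtain ⟨hsym, hval, hnd⟩ := h
  refine ⟨?_, ?_, ?_⟩
  · intro u v hv
    rw [pvN_link] at hv ⊢
    rcases hv with hv | ⟨rfl, rfl⟩ | ⟨rfl, rfl⟩
    · exact Or.inl (hsym _ _ hv)
    · exact Or.inr (Or.inr ⟨rfl, rfl⟩)
    · exact Or.inr (Or.inl ⟨rfl, rfl⟩)
  · intro u v hv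
    rw [pvN_link] at hv
    rw [pv_keys_link]
    rcases hv with hv | ⟨rfl, rfl⟩ | ⟨rfl, rfl⟩
    · exact Or.inr (Or.inr (hval _ _ hv))
    · exact Or.inr (Or.inl rfl)
    · exact Or.inl rfl
  · exact PySem.Dict.nodup_keys_insert _ _ _ (PySem.Dict.nodup_keys_insert _ _ _ hnd)

theorem pvGood_addEdges (g : PySem.Dict Int (PySem.Set Int)) (graph : List (Int × List Int))
    (h : pvGood g) : pvGood (pvA_addEdges g graph) := by
  show pvGood (graph.foldl (fun g p => p.2.foldl (fun g c => pvB_link g p.1 c) g) g)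
  induction graph generalizing g with
  | nil => exact h
  | cons p t ih =>
    rw [List.foldl_cons]
    apply ih
    have aux : ∀ (cs : List Int) (g : PySem.Dict Int (PySem.Set Int)), pvGood g →
        pvGood (cs.foldl (fun g c => pvB_link g p.1 c) g) := by
      intro cs
      induction cs with
      | nil => exact fun _ h => h
      | cons c ct ihc =>
        intro g hgood
        rw [List.foldl_cons]
        exact ihc _ (pvGood_link _ _ _ hgood)
    exact aux p.2 g h

-- the two ports build the same adjacency dict
theorem pv_build_eq (g1 g2 : List (Int × List Int)) :
    pvB_build [g1, g2] = pvA_addEdges (pvA_addEdges PySem.Dict.empty g1) g2 := rfl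

-- measure bookkeeping
theorem pvUnv_le (cg : PySem.Dict Int (PySem.Set Int)) (visited : PySem.Set Int) :
    pvUnv cg visited ≤ cg.size := by
  calc (cg.keys.filter _).length ≤ cg.keys.length := List.length_filter_le _ _
    _ = cg.size := by simp [PySem.Dict.keys, PySem.Dict.size]
theorem pvUnv_add (cg : PySem.Dict Int (PySem.Set Int)) (visited : PySem.Set Int) {k : Int}
    (hk : k ∈ cg.keys) (hnd : cg.keys.Nodup) (hkv : k ∉ visited) :
    pvUnv cg (PySem.Set.add visited k) + 1 = pvUnv cg visited := by
  have hpt : ∀ j : Int, j ≠ k →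
      PySem.Set.contains (PySem.Set.add visited k) j = PySem.Set.contains visited j := by
    intro j hj
    rw [Bool.eq_iff_iff, PySem.Set.contains_iff, PySem.Set.contains_iff,
      PySem.Set.mem_add]
    constructor
    · rintro (h | h)
      · exact h
      · exact absurd h hj
    · exact Or.inl
  have hkfalse : PySem.Set.contains visited k = false := by
    cases hc : PySem.Set.contains visited k with
    | false => rfl
    | true => exact absurd ((PySem.Set.contains_iff _ _).1 hc) hkv
  have hktrue : PySem.Set.contains (PySem.Set.add visited k) k = true :=
    (PySem.Set.contains_iff _ _).2 ((PySem.Set.mem_add _ _ _).2 (Or.inr rfl))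
  have aux : ∀ l : List Int, l.Nodup → k ∈ l →
      (l.filter fun j => !(PySem.Set.contains (PySem.Set.add visited k) j)).length + 1 =
      (l.filter fun j => !(PySem.Set.contains visited j)).length := by
    intro l
    induction l with
    | nil => intro _ h; cases h
    | cons a t ih =>
      intro hnd hkl
      obtain ⟨hat, htnd⟩ := List.nodup_cons.1 hnd
      rw [List.filter_cons, List.filter_cons]
      rcases List.mem_cons.1 hkl with heq | hkt
      · subst heq
        have hfe : List.filter (fun j => !(PySem.Set.contains (PySem.Set.add visited k) j)) t =
            List.filter (fun j => !(PySem.Set.contains visited j)) t :=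
          List.filter_congr (fun j hj => by rw [hpt j (fun h => hat (h ▸ hj))])
        rw [hktrue, hkfalse, hfe]
        simp
      · have hak : a ≠ k := fun h => hat (h ▸ hkt)
        rw [hpt a hak]
        have := ih htnd hkt
        cases PySem.Set.contains visited a <;> simp only [Bool.not_false, Bool.not_true,
          if_true, if_false, List.length_cons, Bool.false_eq_true, if_neg, ite_true,
          ite_false] <;> omega
  exact aux cg.keys hnd hk

-- the inner neighbour fold of A's loop
theorem pvA_fold_spec (cg : PySem.Dict Int (PySem.Set Int)) (inputs : List Int)
    (hval : ∀ a b, b ∈ pvN cg a → b ∈ cg.keys) (hnd : cg.keys.Nodup) :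
    ∀ (ns stack : List Int) (visited comp : PySem.Set Int),
    (∀ y ∈ ns, y ∈ cg.keys) → (∀ x ∈ visited, x ∉ inputs) → visited.Nodup → comp.Nodup →
    (∀ x, x ∈ (ns.foldl (pvA_visit cg inputs) (stack, visited, comp)).1 ↔
        x ∈ stack ∨ (x ∈ ns ∧ x ∉ inputs ∧ x ∉ visited)) ∧
    (∀ x, x ∈ (ns.foldl (pvA_visit cg inputs) (stack, visited, comp)).2.1 ↔
        x ∈ visited ∨ (x ∈ ns ∧ x ∉ inputs)) ∧
    (∀ x, x ∈ (ns.foldl (pvA_visit cg inputs) (stack, visited, comp)).2.2 ↔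
        x ∈ comp ∨ (x ∈ ns ∧ x ∈ inputs)) ∧
    (ns.foldl (pvA_visit cg inputs) (stack, visited, comp)).2.1.Nodup ∧
    (ns.foldl (pvA_visit cg inputs) (stack, visited, comp)).2.2.Nodup ∧
    (ns.foldl (pvA_visit cg inputs) (stack, visited, comp)).1.length +
        pvUnv cg (ns.foldl (pvA_visit cg inputs) (stack, visited, comp)).2.1 =
      stack.length + pvUnv cg visited := by
  intro ns
  induction ns with
  | nil =>
    intro stack visited comp _ hvi hvn hcn
    refine ⟨fun x => ?_, fun x => ?_, fun x => ?_, hvn, hcn, rfl⟩ <;> simp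
  | cons y t ih =>
    intro stack visited comp hns hvi hvn hcn
    have hy : y ∈ cg.keys := hns y List.mem_cons_self
    have hnst : ∀ z ∈ t, z ∈ cg.keys := fun z hz => hns z (List.mem_cons_of_mem _ hz)
    rw [List.foldl_cons]
    cases hvy : PySem.Set.contains visited y with
    | true =>
      have hyv : y ∈ visited := (PySem.Set.contains_iff _ _).1 hvy
      have hstep : pvA_visit cg inputs (stack, visited, comp) y = (stack, visited, comp) := by
        simp [pvA_visit, hvy, hyv]
      rw [hstep]
      obtain ⟨i1, i2, i3, i4, i5, i6⟩ := ih stack visited comp hnst hvi hvn hcn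
      refine ⟨fun x => ?_, fun x => ?_, fun x => ?_, i4, i5, i6⟩
      · rw [i1, List.mem_cons]
        constructor
        · rintro (h | ⟨h1, h2, h3⟩)
          · exact Or.inl h
          · exact Or.inr ⟨Or.inr h1, h2, h3⟩
        · rintro (h | ⟨rfl | h1, h2, h3⟩)
          · exact Or.inl h
          · exact absurd hyv h3
          · exact Or.inr ⟨h1, h2, h3⟩
      · rw [i2, List.mem_cons]
        constructor
        · rintro (h | ⟨h1, h2⟩)
          · exact Or.inl h
          · exact Or.inr ⟨Or.inr h1, h2⟩
        · rintro (h | ⟨rfl | h1, h2⟩)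
          · exact Or.inl h
          · exact Or.inl hyv
          · exact Or.inr ⟨h1, h2⟩
      · rw [i3, List.mem_cons]
        constructor
        · rintro (h | ⟨h1, h2⟩)
          · exact Or.inl h
          · exact Or.inr ⟨Or.inr h1, h2⟩
        · rintro (h | ⟨rfl | h1, h2⟩)
          · exact Or.inl h
          · exact absurd h2 (hvi _ hyv)
          · exact Or.inr ⟨h1, h2⟩
    | false =>
      have hyV : y ∉ visited := fun hm =>
        by rw [(PySem.Set.contains_iff _ _).2 hm] at hvy; cases hvy
      by_cases hyi : y ∈ inputs
      · have hstep : pvA_visit cg inputs (stack, visited, comp) y =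
            (stack, visited, PySem.Set.add comp y) := by
          simp [pvA_visit, hvy, hyi, hyV]
        rw [hstep]
        obtain ⟨i1, i2, i3, i4, i5, i6⟩ :=
          ih stack visited (PySem.Set.add comp y) hnst hvi hvn (PySem.Set.nodup_add _ _ hcn)
        refine ⟨fun x => ?_, fun x => ?_, fun x => ?_, i4, i5, i6⟩
        · rw [i1, List.mem_cons]
          constructor
          · rintro (h | ⟨h1, h2, h3⟩)
            · exact Or.inl h
            · exact Or.inr ⟨Or.inr h1, h2, h3⟩
          · rintro (h | ⟨rfl | h1, h2, h3⟩)
            · exact Or.inl h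
            · exact absurd hyi h2
            · exact Or.inr ⟨h1, h2, h3⟩
        · rw [i2, List.mem_cons]
          constructor
          · rintro (h | ⟨h1, h2⟩)
            · exact Or.inl h
            · exact Or.inr ⟨Or.inr h1, h2⟩
          · rintro (h | ⟨rfl | h1, h2⟩)
            · exact Or.inl h
            · exact absurd hyi h2
            · exact Or.inr ⟨h1, h2⟩
        · rw [i3, PySem.Set.mem_add, List.mem_cons]
          constructor
          · rintro ((h | rfl) | ⟨h1, h2⟩)
            · exact Or.inl h
            · exact Or.inr ⟨Or.inl rfl, hyi⟩
            · exact Or.inr ⟨Or.inr h1, h2⟩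
          · rintro (h | ⟨rfl | h1, h2⟩)
            · exact Or.inl (Or.inl h)
            · exact Or.inl (Or.inr rfl)
            · exact Or.inr ⟨h1, h2⟩
      · have hstep : pvA_visit cg inputs (stack, visited, comp) y =
            (y :: stack, PySem.Set.add visited y, comp) := by
          simp [pvA_visit, hvy, hyi, hyV]
        rw [hstep]
        have hvi' : ∀ x ∈ PySem.Set.add visited y, x ∉ inputs := by
          intro x hx
          rcases (PySem.Set.mem_add _ _ _).1 hx with h | rfl
          · exact hvi _ h
          · exact hyi
        obtain ⟨i1, i2, i3, i4, i5, i6⟩ := ih (y :: stack) (PySem.Set.add visited y) comp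
          hnst hvi' (PySem.Set.nodup_add _ _ hvn) hcn
        refine ⟨fun x => ?_, fun x => ?_, fun x => ?_, i4, i5, ?_⟩
        · rw [i1, List.mem_cons, List.mem_cons]
          constructor
          · rintro ((rfl | h) | ⟨h1, h2, h3⟩)
            · exact Or.inr ⟨Or.inl rfl, hyi, hyV⟩
            · exact Or.inl h
            · refine Or.inr ⟨Or.inr h1, h2, fun hm => h3 ((PySem.Set.mem_add _ _ _).2 (Or.inl hm))⟩
          · rintro (h | ⟨rfl | h1, h2, h3⟩)
            · exact Or.inl (Or.inr h)
            · exact Or.inl (Or.inl rfl)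
            · by_cases hxy : x = y
              · exact Or.inl (Or.inl hxy)
              · refine Or.inr ⟨h1, h2, fun hm => ?_⟩
                rcases (PySem.Set.mem_add _ _ _).1 hm with hm | hm
                · exact h3 hm
                · exact hxy hm
        · rw [i2, PySem.Set.mem_add, List.mem_cons]
          constructor
          · rintro ((h | rfl) | ⟨h1, h2⟩)
            · exact Or.inl h
            · exact Or.inr ⟨Or.inl rfl, hyi⟩
            · exact Or.inr ⟨Or.inr h1, h2⟩
          · rintro (h | ⟨rfl | h1, h2⟩)
            · exact Or.inl (Or.inl h)
            · exact Or.inl (Or.inr rfl)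
            · exact Or.inr ⟨h1, h2⟩
        · rw [i3, List.mem_cons]
          constructor
          · rintro (h | ⟨h1, h2⟩)
            · exact Or.inl h
            · exact Or.inr ⟨Or.inr h1, h2⟩
          · rintro (h | ⟨rfl | h1, h2⟩)
            · exact Or.inl h
            · exact absurd h2 hyi
            · exact Or.inr ⟨h1, h2⟩
        · have hadd := pvUnv_add cg visited hy hnd hyV
          rw [i6, List.length_cons]
          omega

-- A's while-loop preserves the invariant and empties the stack within the fuel
theorem pvA_loop_spec (cg : PySem.Dict Int (PySem.Set Int)) (inputs : List Int) (o : Int)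
    (V0 : PySem.Set Int) (hg : pvGood cg) (ho : o ∉ inputs)
    (hV0inp : ∀ x ∈ V0, x ∉ inputs) :
    ∀ (fuel : Nat) (stack : List Int) (visited comp : PySem.Set Int),
    pvInv cg inputs o V0 stack visited comp →
    stack.length + pvUnv cg visited ≤ fuel →
    pvInv cg inputs o V0 []
      (pvA_dfsLoop cg inputs fuel stack visited comp).1
      (pvA_dfsLoop cg inputs fuel stack visited comp).2 := by
  intro fuel
  induction fuel with
  | zero =>
    intro stack visited comp hinv hfuel
    have hstack : stack = [] := List.length_eq_zero_iff.1 (by omega)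
    subst hstack
    simpa [pvA_dfsLoop] using hinv
  | succ fuel ih =>
    intro stack visited comp hinv hfuel
    cases stack with
    | nil => simpa [pvA_dfsLoop] using hinv
    | cons current stack =>
      obtain ⟨hcv, hccl, hci⟩ := hinv.stack_ok current List.mem_cons_self
      have hvi : ∀ x ∈ visited, x ∉ inputs := by
        intro x hx
        rcases hinv.vis_sound x hx with h | ⟨_, h2⟩
        · exact hV0inp _ h
        · exact h2
      have hns : ∀ z ∈ pvN cg current, z ∈ cg.keys := fun z hz => hg.2.1 _ _ hz
      obtain ⟨f1, f2, f3, f4, f5, f6⟩ := pvA_fold_spec cg inputs hg.2.1 hg.2.2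
        (cg.getD current PySem.Set.empty) stack visited (PySem.Set.add comp current) hns hvi
        hinv.vis_nodup (PySem.Set.nodup_add _ _ hinv.comp_nodup)
      simp only [pvA_dfsLoop]
      apply ih
      · constructor
        · -- stack_ok
          intro x hx
          rcases (f1 x).1 hx with h | ⟨hn, hni, hnv⟩
          · obtain ⟨h1, h2, h3⟩ := hinv.stack_ok x (List.mem_cons_of_mem _ h)
            exact ⟨(f2 x).2 (Or.inl h1), h2, h3⟩
          · exact ⟨(f2 x).2 (Or.inr ⟨hn, hni⟩), hccl.tail ⟨hci, hni, hn⟩, hni⟩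
        · -- vis_sound
          intro x hx
          rcases (f2 x).1 hx with h | ⟨hn, hni⟩
          · exact hinv.vis_sound x h
          · exact Or.inr ⟨hccl.tail ⟨hci, hni, hn⟩, hni⟩
        · -- vis_mono
          exact fun x hx => (f2 x).2 (Or.inl (hinv.vis_mono x hx))
        · -- o_vis
          exact (f2 o).2 (Or.inl hinv.o_vis)
        · -- expanded
          intro x hx hxV0
          by_cases hxv : x ∈ visited
          · by_cases hxc : x = current
            · subst hxc
              exact Or.inr fun y hy hyi => (f2 y).2 (Or.inr ⟨hy, hyi⟩)
            · rcases hinv.expanded x hxv hxV0 with hs | hclosed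
              · rcases List.mem_cons.1 hs with h | h
                · exact absurd h hxc
                · exact Or.inl ((f1 x).2 (Or.inl h))
              · exact Or.inr fun y hy hyi => (f2 y).2 (Or.inl (hclosed y hy hyi))
          · rcases (f2 x).1 hx with h | ⟨hn, hni⟩
            · exact absurd h hxv
            · exact Or.inl ((f1 x).2 (Or.inr ⟨hn, hni, hxv⟩))
        · -- comp_sound
          intro c hc
          rcases (f3 c).1 hc with h | ⟨hn, hni⟩
          · rcases (PySem.Set.mem_add _ _ _).1 h with h | rfl
            · exact hinv.comp_sound c h
            · exact Or.inl hccl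
          · exact Or.inr ⟨hni, current, hccl, hn⟩
        · -- popped_comp
          intro x hx hxV0 hxs
          by_cases hxv : x ∈ visited
          · by_cases hxc : x = current
            · subst hxc
              exact (f3 x).2 (Or.inl ((PySem.Set.mem_add _ _ _).2 (Or.inr rfl)))
            · have hxst : x ∉ current :: stack := by
                intro h
                rcases List.mem_cons.1 h with h | h
                · exact hxc h
                · exact hxs ((f1 x).2 (Or.inl h))
              exact (f3 x).2 (Or.inl ((PySem.Set.mem_add _ _ _).2
                (Or.inl (hinv.popped_comp x hxv hxV0 hxst))))
          · rcases (f2 x).1 hx with h | ⟨hn, hni⟩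
            · exact absurd h hxv
            · exact absurd ((f1 x).2 (Or.inr ⟨hn, hni, hxv⟩)) hxs
        · -- popped_inp
          intro x hx hxV0 hxs y hy hyi
          by_cases hxv : x ∈ visited
          · by_cases hxc : x = current
            · subst hxc
              exact (f3 y).2 (Or.inr ⟨hy, hyi⟩)
            · have hxst : x ∉ current :: stack := by
                intro h
                rcases List.mem_cons.1 h with h | h
                · exact hxc h
                · exact hxs ((f1 x).2 (Or.inl h))
              exact (f3 y).2 (Or.inl ((PySem.Set.mem_add _ _ _).2
                (Or.inl (hinv.popped_inp x hxv hxV0 hxst y hy hyi))))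
          · rcases (f2 x).1 hx with h | ⟨hn, hni⟩
            · exact absurd h hxv
            · exact absurd ((f1 x).2 (Or.inr ⟨hn, hni, hxv⟩)) hxs
        · -- vis_nodup
          exact f4
        · -- comp_nodup
          exact f5
      · -- fuel bound
        rw [f6]
        simp only [List.length_cons] at hfuel
        omega

-- characterization of dfs for a fresh non-input output
theorem pvA_dfs_spec (cg : PySem.Dict Int (PySem.Set Int)) (inputs : List Int) (o : Int)
    (V0 : PySem.Set Int) (hg : pvGood cg) (ho : o ∉ inputs) (hoV0 : o ∉ V0)
    (hV0inp : ∀ x ∈ V0, x ∉ inputs)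
    (hV0cl : ∀ x ∈ V0, ∀ y ∈ pvN cg x, y ∉ inputs → y ∈ V0)
    (hV0nd : V0.Nodup) :
    (∀ x, x ∈ (pvA_dfs cg inputs o V0 PySem.Set.empty).1 ↔ x ∈ V0 ∨ pvCl cg inputs o x) ∧
    (∀ x, x ∈ (pvA_dfs cg inputs o V0 PySem.Set.empty).2 ↔ pvComp cg inputs o x) ∧
    (pvA_dfs cg inputs o V0 PySem.Set.empty).1.Nodup ∧
    (pvA_dfs cg inputs o V0 PySem.Set.empty).2.Nodup := by
  have hsymR : Symmetric (pvR cg inputs) := pvR_symm cg inputs hg.1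
  have hV0closedR : ∀ a ∈ V0, ∀ b, pvR cg inputs a b → b ∈ V0 := by
    rintro a ha b ⟨h1, h2, h3⟩
    exact hV0cl a ha b h3 h2
  have hdisj : ∀ x, pvCl cg inputs o x → x ∉ V0 := by
    intro x hx hxV0
    exact hoV0 (pvCl_subset_closed cg inputs V0 hV0closedR hxV0
      (Relation.ReflTransGen.symmetric hsymR hx))
  have hinv0 : pvInv cg inputs o V0 [o] (PySem.Set.add V0 o) PySem.Set.empty := by
    constructor
    · intro x hx
      rcases List.mem_cons.1 hx with rfl | hx
      · exact ⟨(PySem.Set.mem_add _ _ _).2 (Or.inr rfl), Relation.ReflTransGen.refl, ho⟩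
      · cases hx
    · intro x hx
      rcases (PySem.Set.mem_add _ _ _).1 hx with h | rfl
      · exact Or.inl h
      · exact Or.inr ⟨Relation.ReflTransGen.refl, ho⟩
    · exact fun x hx => (PySem.Set.mem_add _ _ _).2 (Or.inl hx)
    · exact (PySem.Set.mem_add _ _ _).2 (Or.inr rfl)
    · intro x hx hxV0
      rcases (PySem.Set.mem_add _ _ _).1 hx with h | rfl
      · exact absurd h hxV0
      · exact Or.inl List.mem_cons_self
    · intro c hc
      rw [PySem.Set.empty_eq] at hc
      cases hc
    · intro x hx hxV0 hxs
      rcases (PySem.Set.mem_add _ _ _).1 hx with h | rfl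
      · exact absurd h hxV0
      · exact absurd List.mem_cons_self hxs
    · intro x hx hxV0 hxs
      rcases (PySem.Set.mem_add _ _ _).1 hx with h | rfl
      · exact absurd h hxV0
      · exact absurd List.mem_cons_self hxs
    · exact PySem.Set.nodup_add _ _ hV0nd
    · rw [PySem.Set.empty_eq]; exact List.nodup_nil
  have hfuel : [o].length + pvUnv cg (PySem.Set.add V0 o) ≤ cg.size + 1 := by
    have := pvUnv_le cg (PySem.Set.add V0 o)
    simp only [List.length_cons, List.length_nil]
    omega
  have hfin := pvA_loop_spec cg inputs o V0 hg ho hV0inp (cg.size + 1) [o]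
    (PySem.Set.add V0 o) PySem.Set.empty hinv0 hfuel
  have hred : pvA_dfs cg inputs o V0 PySem.Set.empty =
      pvA_dfsLoop cg inputs (cg.size + 1) [o] (PySem.Set.add V0 o) PySem.Set.empty := by
    rw [pvA_dfs, if_neg ho]
  rw [hred]
  have hclin : ∀ x, pvCl cg inputs o x →
      x ∈ (pvA_dfsLoop cg inputs (cg.size + 1) [o] (PySem.Set.add V0 o) PySem.Set.empty).1 := by
    intro x hx
    apply pvCl_subset_closed cg inputs _ ?_ hfin.o_vis hx
    rintro a ha b ⟨hb1, hb2, hb3⟩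
    by_cases haV0 : a ∈ V0
    · exact hfin.vis_mono _ (hV0cl a haV0 b hb3 hb2)
    · rcases hfin.expanded a ha haV0 with hs | hcl
      · cases hs
      · exact hcl b hb3 hb2
  refine ⟨?_, ?_, hfin.vis_nodup, hfin.comp_nodup⟩
  · intro x
    constructor
    · intro hx
      rcases hfin.vis_sound x hx with h | ⟨h, _⟩
      · exact Or.inl h
      · exact Or.inr h
    · rintro (h | h)
      · exact hfin.vis_mono x h
      · exact hclin x h
  · intro x
    constructor
    · exact fun hx => hfin.comp_sound x hx
    · rintro (h | ⟨hinp, z, hz, hzn⟩)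
      · exact hfin.popped_comp x (hclin x h) (hdisj x h) (List.not_mem_nil)
      · exact hfin.popped_inp z (hclin z hz) (hdisj z hz) (List.not_mem_nil) x hzn hinp

-- B's grow: membership, nodup, stays inside the key universe
theorem pvB_grow_mem (adj : PySem.Dict Int (PySem.Set Int)) (inputset comp : PySem.Set Int) :
    ∀ y, y ∈ pvB_grow adj inputset comp ↔
      y ∈ comp ∨ ∃ x ∈ comp, x ∉ inputset ∧ y ∈ pvN adj x := by
  have aux : ∀ (l : List Int) (acc : PySem.Set Int) (y : Int),
      y ∈ l.foldl (fun new x => if PySem.Set.contains inputset x then new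
          else PySem.Set.union new (adj.getD x PySem.Set.empty)) acc ↔
      y ∈ acc ∨ ∃ x ∈ l, x ∉ inputset ∧ y ∈ pvN adj x := by
    intro l
    induction l with
    | nil => simp
    | cons a t ih =>
      intro acc y
      rw [List.foldl_cons]
      cases hc : PySem.Set.contains inputset a with
      | true =>
        have ha : a ∈ inputset := (PySem.Set.contains_iff _ _).1 hc
        rw [if_pos rfl] -- hc rewritten below
        rw [ih]
        constructor
        · rintro (h | ⟨x, hx, h1, h2⟩)
          · exact Or.inl h
          · exact Or.inr ⟨x, List.mem_cons_of_mem _ hx, h1, h2⟩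
        · rintro (h | ⟨x, hx, h1, h2⟩)
          · exact Or.inl h
          · rcases List.mem_cons.1 hx with rfl | hx
            · exact absurd ha h1
            · exact Or.inr ⟨x, hx, h1, h2⟩
      | false =>
        have ha : a ∉ inputset := fun hm =>
          by rw [(PySem.Set.contains_iff _ _).2 hm] at hc; cases hc
        rw [if_neg Bool.false_ne_true]
        rw [ih]
        simp only [PySem.Set.mem_union]
        constructor
        · rintro ((h | h) | ⟨x, hx, h1, h2⟩)
          · exact Or.inl h
          · exact Or.inr ⟨a, List.mem_cons_self, ha, h⟩
          · exact Or.inr ⟨x, List.mem_cons_of_mem _ hx, h1, h2⟩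
        · rintro (h | ⟨x, hx, h1, h2⟩)
          · exact Or.inl (Or.inl h)
          · rcases List.mem_cons.1 hx with rfl | hx
            · exact Or.inl (Or.inr h2)
            · exact Or.inr ⟨x, hx, h1, h2⟩
  exact fun y => aux comp comp y
theorem pvB_grow_nodup (adj : PySem.Dict Int (PySem.Set Int)) (inputset comp : PySem.Set Int)
    (h : comp.Nodup) : (pvB_grow adj inputset comp).Nodup := by
  have aux : ∀ (l : List Int) (acc : PySem.Set Int), acc.Nodup →
      (l.foldl (fun new x => if PySem.Set.contains inputset x then new
          else PySem.Set.union new (adj.getD x PySem.Set.empty)) acc).Nodup := by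
    intro l
    induction l with
    | nil => intro acc h; exact h
    | cons a t ih =>
      intro acc hacc
      rw [List.foldl_cons]
      cases PySem.Set.contains inputset a
      · exact ih _ (PySem.Set.nodup_union _ _ hacc)
      · exact ih _ hacc
  exact aux comp comp h

-- B's saturation reaches a fixed point of grow within the fuel, preserving any
-- neighbour-closed property P of its members
theorem pvB_saturate_fix (adj : PySem.Dict Int (PySem.Set Int)) (inputset : PySem.Set Int)
    (U : List Int) (hkeys : ∀ a b, b ∈ pvN adj a → b ∈ U)
    (P : Int → Prop) (hP : ∀ x, P x → x ∉ inputset → ∀ y ∈ pvN adj x, P y) :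
    ∀ (fuel : Nat) (comp : PySem.Set Int), comp.Nodup → (∀ x ∈ comp, x ∈ U) →
    (∀ x ∈ comp, P x) → U.length ≤ fuel + comp.length →
    (pvB_saturate adj inputset fuel comp).Nodup ∧
    (∀ x ∈ comp, x ∈ pvB_saturate adj inputset fuel comp) ∧
    (∀ x ∈ pvB_saturate adj inputset fuel comp, P x) ∧
    (∀ y, y ∈ pvB_grow adj inputset (pvB_saturate adj inputset fuel comp) ↔
        y ∈ pvB_saturate adj inputset fuel comp) := by
  intro fuel
  induction fuel with
  | zero =>
    intro comp hnd hsub hsound hlen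
    simp only [pvB_saturate]
    refine ⟨hnd, fun x hx => hx, hsound, fun y => ⟨?_, ?_⟩⟩
    · intro hy
      by_contra hyc
      have hysub : y ∈ U := by
        rcases (pvB_grow_mem adj inputset comp y).1 hy with h | ⟨x, _, _, h2⟩
        · exact absurd h hyc
        · exact hkeys _ _ h2
      have hynd : (y :: comp).Nodup := List.nodup_cons.2 ⟨hyc, hnd⟩
      have hsubs : y :: comp ⊆ U := by
        intro z hz
        rcases List.mem_cons.1 hz with rfl | hz
        · exact hysub
        · exact hsub z hz
      have := (hynd.subperm hsubs).length_le
      simp only [List.length_cons] at this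
      omega
    · exact fun hy => (pvB_grow_mem adj inputset comp y).2 (Or.inl hy)
  | succ fuel ih =>
    intro comp hnd hsub hsound hlen
    simp only [pvB_saturate]
    cases heq : PySem.Set.equal (pvB_grow adj inputset comp) comp with
    | true =>
      simp only [if_true]
      have hgm := (PySem.Set.equal_iff _ _).1 heq
      exact ⟨hnd, fun x hx => hx, hsound, hgm⟩
    | false =>
      simp only [Bool.false_eq_true, if_false]
      have hcompnew : ∀ x ∈ comp, x ∈ pvB_grow adj inputset comp :=
        fun x hx => (pvB_grow_mem adj inputset comp x).2 (Or.inl hx)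
      have hnewnd := pvB_grow_nodup adj inputset comp hnd
      have hnewsub : ∀ x ∈ pvB_grow adj inputset comp, x ∈ U := by
        intro x hx
        rcases (pvB_grow_mem adj inputset comp x).1 hx with h | ⟨z, _, _, h2⟩
        · exact hsub x h
        · exact hkeys _ _ h2
      have hnewsound : ∀ x ∈ pvB_grow adj inputset comp, P x := by
        intro x hx
        rcases (pvB_grow_mem adj inputset comp x).1 hx with h | ⟨z, hz, hzi, h2⟩
        · exact hsound x h
        · exact hP z (hsound z hz) hzi x h2
      have hne : ∃ y, y ∈ pvB_grow adj inputset comp ∧ y ∉ comp := by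
        by_contra hc
        push Not at hc
        have : PySem.Set.equal (pvB_grow adj inputset comp) comp = true :=
          (PySem.Set.equal_iff _ _).2 (fun x => ⟨fun h => hc x h, fun h => hcompnew x h⟩)
        rw [this] at heq
        cases heq
      obtain ⟨y, hy1, hy2⟩ := hne
      have hlen' : U.length ≤ fuel + (pvB_grow adj inputset comp).length := by
        have h1 : (y :: comp).Nodup := List.nodup_cons.2 ⟨hy2, hnd⟩
        have h2 : y :: comp ⊆ pvB_grow adj inputset comp := by
          intro z hz
          rcases List.mem_cons.1 hz with rfl | hz
          · exact hy1
          · exact hcompnew z hz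
        have := (h1.subperm h2).length_le
        simp only [List.length_cons] at this
        omega
      obtain ⟨j1, j2, j3, j4⟩ := ih (pvB_grow adj inputset comp) hnewnd hnewsub hnewsound hlen'
      exact ⟨j1, fun x hx => j2 x (hcompnew x hx), j3, j4⟩

-- characterization of B's saturation started at {o}
theorem pvB_saturate_spec (adj : PySem.Dict Int (PySem.Set Int)) (inputs : List Int) (o : Int)
    (hg : pvGood adj) (ho : o ∉ inputs) :
    (∀ x, x ∈ pvB_saturate adj (PySem.Set.ofList inputs) adj.size
        (PySem.Set.add PySem.Set.empty o) ↔ pvComp adj inputs o x) ∧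
    (pvB_saturate adj (PySem.Set.ofList inputs) adj.size
        (PySem.Set.add PySem.Set.empty o)).Nodup := by
  have hmemis : ∀ x : Int, x ∈ PySem.Set.ofList inputs ↔ x ∈ inputs :=
    fun x => PySem.Set.mem_ofList inputs x
  have hkeys : ∀ a b, b ∈ pvN adj a → b ∈ PySem.Set.ofList (o :: adj.keys) := by
    intro a b hb
    exact (PySem.Set.mem_ofList _ _).2 (List.mem_cons_of_mem _ (hg.2.1 _ _ hb))
  have hP : ∀ x, pvComp adj inputs o x → x ∉ PySem.Set.ofList inputs →
      ∀ y ∈ pvN adj x, pvComp adj inputs o y := by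
    intro x hx hxis y hy
    have hxi : x ∉ inputs := fun h => hxis ((hmemis x).2 h)
    rcases hx with hx | ⟨hxinp, _, _, _⟩
    · by_cases hyi : y ∈ inputs
      · exact Or.inr ⟨hyi, x, hx, hy⟩
      · exact Or.inl (hx.tail ⟨hxi, hyi, hy⟩)
    · exact absurd hxinp hxi
  have hc0 : PySem.Set.add PySem.Set.empty o = [o] := by
    rw [PySem.Set.empty_eq, PySem.Set.add_of_not_mem (by simp)]
    rfl
  have hlen : (PySem.Set.ofList (o :: adj.keys)).length ≤
      adj.size + (PySem.Set.add PySem.Set.empty o).length := by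
    have h1 := PySem.Set.length_ofList_le (o :: adj.keys)
    have h2 : adj.keys.length = adj.size := by
      simp [PySem.Dict.keys, PySem.Dict.size]
    rw [hc0]
    simp only [List.length_cons] at h1 ⊢
    omega
  obtain ⟨j1, j2, j3, j4⟩ := pvB_saturate_fix adj (PySem.Set.ofList inputs)
    (PySem.Set.ofList (o :: adj.keys)) hkeys (pvComp adj inputs o) hP adj.size
    (PySem.Set.add PySem.Set.empty o)
    (by rw [hc0]; exact List.nodup_singleton o)
    (by rw [hc0]; intro x hx; rw [List.mem_singleton.1 hx]
        exact (PySem.Set.mem_ofList _ _).2 List.mem_cons_self)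
    (by rw [hc0]; intro x hx; rw [List.mem_singleton.1 hx]
        exact Or.inl Relation.ReflTransGen.refl)
    hlen
  have hoT : o ∈ pvB_saturate adj (PySem.Set.ofList inputs) adj.size
      (PySem.Set.add PySem.Set.empty o) := by
    apply j2
    rw [hc0]
    exact List.mem_singleton.2 rfl
  have hclosed : ∀ a ∈ pvB_saturate adj (PySem.Set.ofList inputs) adj.size
      (PySem.Set.add PySem.Set.empty o), ∀ b, pvR adj inputs a b →
      b ∈ pvB_saturate adj (PySem.Set.ofList inputs) adj.size
        (PySem.Set.add PySem.Set.empty o) := by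
    rintro a ha b ⟨ha1, _, hb2⟩
    apply (j4 b).1
    exact (pvB_grow_mem _ _ _ b).2 (Or.inr ⟨a, ha, fun h => ha1 ((hmemis a).1 h), hb2⟩)
  have hclT : ∀ x, pvCl adj inputs o x → x ∈ pvB_saturate adj (PySem.Set.ofList inputs)
      adj.size (PySem.Set.add PySem.Set.empty o) :=
    fun x hx => pvCl_subset_closed adj inputs _ hclosed hoT hx
  refine ⟨fun x => ⟨fun hx => j3 x hx, ?_⟩, j1⟩
  rintro (h | ⟨hinp, z, hz, hzn⟩)
  · exact hclT x h
  · have hzT := hclT z hz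
    have hzi : z ∉ inputs := pvCl_noninp adj inputs ho hz
    apply (j4 x).1
    exact (pvB_grow_mem _ _ _ x).2 (Or.inr ⟨z, hzT, fun h => hzi ((hmemis z).1 h), hzn⟩)

-- the joint outer loop
theorem pv_outer (cg : PySem.Dict Int (PySem.Set Int)) (inputs : List Int) (hg : pvGood cg) :
    ∀ (outs : List Int) (vA sB : PySem.Set Int) (acc : List (List Int)),
    (∀ x, x ∈ vA ↔ x ∈ sB) → (∀ x ∈ vA, x ∉ inputs) →
    (∀ x ∈ vA, ∀ y ∈ pvN cg x, y ∉ inputs → y ∈ vA) → vA.Nodup → sB.Nodup →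
    (outs.foldl (pvA_round cg inputs) (vA, acc)).2 =
    (outs.foldl (pvB_round cg (PySem.Set.ofList inputs) cg.size) (sB, acc)).2 := by
  intro outs
  induction outs with
  | nil => intro vA sB acc _ _ _ _ _; rfl
  | cons o t ih =>
    intro vA sB acc hmm hni hcl hvnd hsnd
    rw [List.foldl_cons, List.foldl_cons]
    by_cases ho : o ∈ inputs
    · -- an output that is an input node: both sides emit the singleton {o}
      have hBif : PySem.Set.contains (PySem.Set.ofList inputs) o = true :=
        (PySem.Set.contains_iff _ _).2 ((PySem.Set.mem_ofList _ _).2 ho)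
      have hAv : o ∉ vA := fun h => hni o h ho
      have hAc : PySem.Set.contains vA o = false := by
        cases hc : PySem.Set.contains vA o with
        | false => rfl
        | true => exact absurd ((PySem.Set.contains_iff _ _).1 hc) hAv
      have hA : pvA_round cg inputs (vA, acc) o =
          (vA, acc ++ [PySem.List.sorted (PySem.Set.add PySem.Set.empty o) (fun x => x)]) := by
        simp [pvA_round, hAc, pvA_dfs, ho, hAv]
      have hB : pvB_round cg (PySem.Set.ofList inputs) cg.size (sB, acc) o =
          (sB, acc ++ [PySem.List.sorted (PySem.Set.add PySem.Set.empty o) (fun x => x)]) := by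
        simp [pvB_round, hBif, ho]
      rw [hA, hB]
      exact ih vA sB _ hmm hni hcl hvnd hsnd
    · have hBif : PySem.Set.contains (PySem.Set.ofList inputs) o = false := by
        cases hc : PySem.Set.contains (PySem.Set.ofList inputs) o with
        | false => rfl
        | true => exact absurd ((PySem.Set.mem_ofList _ _).1
            ((PySem.Set.contains_iff _ _).1 hc)) ho
      by_cases hov : o ∈ vA
      · have hAc : PySem.Set.contains vA o = true := (PySem.Set.contains_iff _ _).2 hov
        have hBc : PySem.Set.contains sB o = true :=
          (PySem.Set.contains_iff _ _).2 ((hmm o).1 hov)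
        have hsv : o ∈ sB := (hmm o).1 hov
        have hA : pvA_round cg inputs (vA, acc) o = (vA, acc) := by
          simp [pvA_round, hAc, hov]
        have hB : pvB_round cg (PySem.Set.ofList inputs) cg.size (sB, acc) o = (sB, acc) := by
          simp [pvB_round, hBif, hBc, ho, hsv]
        rw [hA, hB]
        exact ih vA sB acc hmm hni hcl hvnd hsnd
      · have hAc : PySem.Set.contains vA o = false := by
          cases hc : PySem.Set.contains vA o with
          | false => rfl
          | true => exact absurd ((PySem.Set.contains_iff _ _).1 hc) hov
        have hBc : PySem.Set.contains sB o = false := by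
          cases hc : PySem.Set.contains sB o with
          | false => rfl
          | true => exact absurd ((hmm o).2 ((PySem.Set.contains_iff _ _).1 hc)) hov
        obtain ⟨d1, d2, d3, d4⟩ := pvA_dfs_spec cg inputs o vA hg ho hov hni hcl hvnd
        obtain ⟨s1, s2⟩ := pvB_saturate_spec cg inputs o hg ho
        have hsort : PySem.List.sorted (pvA_dfs cg inputs o vA PySem.Set.empty).2
              (fun x => x) =
            PySem.List.sorted (pvB_saturate cg (PySem.Set.ofList inputs) cg.size
              (PySem.Set.add PySem.Set.empty o)) (fun x => x) :=
          pv_sorted_eq _ _ d4 s2 (fun a => (d2 a).trans (s1 a).symm)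
        have hA : pvA_round cg inputs (vA, acc) o =
            ((pvA_dfs cg inputs o vA PySem.Set.empty).1,
              acc ++ [PySem.List.sorted (pvA_dfs cg inputs o vA PySem.Set.empty).2
                (fun x => x)]) := by
          simp [pvA_round, hAc, hov]
        have hB : pvB_round cg (PySem.Set.ofList inputs) cg.size (sB, acc) o =
            (PySem.Set.update sB (PySem.Set.diff (pvB_saturate cg (PySem.Set.ofList inputs)
                cg.size (PySem.Set.add PySem.Set.empty o)) (PySem.Set.ofList inputs)),
              acc ++ [PySem.List.sorted (pvB_saturate cg (PySem.Set.ofList inputs) cg.size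
                (PySem.Set.add PySem.Set.empty o)) (fun x => x)]) := by
          have hBv : o ∉ sB := fun h => hov ((hmm o).2 h)
          simp [pvB_round, hBif, hBc, ho, hBv]
        rw [hA, hB, hsort]
        apply ih
        · -- memberships agree
          intro x
          rw [d1 x, PySem.Set.mem_update, PySem.Set.mem_diff]
          constructor
          · rintro (h | h)
            · exact Or.inl ((hmm x).1 h)
            · refine Or.inr ⟨(s1 x).2 (Or.inl h), fun hm => ?_⟩
              exact pvCl_noninp cg inputs ho h ((PySem.Set.mem_ofList _ _).1 hm)
          · rintro (h | ⟨h1, h2⟩)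
            · exact Or.inl ((hmm x).2 h)
            · rcases (s1 x).1 h1 with h | ⟨hinp, _⟩
              · exact Or.inr h
              · exact absurd ((PySem.Set.mem_ofList _ _).2 hinp) h2
        · -- no inputs in visited
          intro x hx
          rcases (d1 x).1 hx with h | h
          · exact hni x h
          · exact pvCl_noninp cg inputs ho h
        · -- visited is closed
          intro x hx y hy hyi
          rcases (d1 x).1 hx with h | h
          · exact (d1 y).2 (Or.inl (hcl x h y hy hyi))
          · exact (d1 y).2 (Or.inr (h.tail ⟨pvCl_noninp cg inputs ho h, hyi, hy⟩))
        · exact d3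
        · exact PySem.Set.nodup_update _ _ hsnd

-- ===== VERDICT (by name: the statement is the Claim_ definition above) =====
theorem get_connected_components_spec : Claim_equal_get_connected_components := by
  unfold Claim_equal_get_connected_components
  intro graph1 graph2 inputs outputs _
  unfold Spec_get_connected_components get_connected_components get_connected_components_alt
  rw [pv_build_eq]
  exact pv_outer _ inputs
    (pvGood_addEdges _ _ (pvGood_addEdges _ _ pvGood_empty)) outputs
    PySem.Set.empty PySem.Set.empty [] (by simp [PySem.Set.empty_eq])
    (by simp [PySem.Set.empty_eq]) (by simp [PySem.Set.empty_eq])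
    (by simp [PySem.Set.empty_eq]) (by simp [PySem.Set.empty_eq])
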